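-- pv_equiv track=rewrite | github.com/cybera/policy-browser | scripts/wrangling/transformations/divide-big-docs.py | make_slices
-- ===== SOURCE A (Python) =====
-- def make_slices(lines, break_threshold=3):
--   slices = []
--   current_slice = []
--   breaks = []
--
--   for line in lines:
--     if line != "":
--       if len(breaks) >= break_threshold:
--         slices.append(current_slice)
--         current_slice = []
--
--       breaks = []
--       current_slice.append(line)
--     else:
--       breaks.append(line)
--
--   return slices
-- ===== SOURCE B (Python) =====
-- def make_slices(lines, break_threshold=3):
--   # Pass 1: annotate each non-empty line with whether it follows a run of
--   # >= break_threshold empty lines.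
--   gap = 0
--   marked = []
--   for line in lines:
--     if line == "":
--       gap += 1
--     else:
--       marked.append((gap >= break_threshold, line))
--       gap = 0
--   # Pass 2: cut before every flagged line; keep only the segments before the
--   # last cut (the trailing segment is dropped, as in the original).
--   cuts = [i for i, (f, _) in enumerate(marked) if f]
--   return [[l for _, l in marked[a:b]] for a, b in zip([0] + cuts, cuts)]
-- ===== Notes on version B (the rewrite author's own statement) =====
-- stated objective: alternative
-- what changed: A's single loop with three pieces of mutable state (slices, current_slice, breaks) is replaced by an annotate-then-cut pipeline: mark each non-empty line with whether it follows a gap of >= break_threshold empty lines, collect the cut indices, and build the result as the slices between consecutive cuts (the trailing segment after the last cut is naturally never emitted).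
import Mathlib
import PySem

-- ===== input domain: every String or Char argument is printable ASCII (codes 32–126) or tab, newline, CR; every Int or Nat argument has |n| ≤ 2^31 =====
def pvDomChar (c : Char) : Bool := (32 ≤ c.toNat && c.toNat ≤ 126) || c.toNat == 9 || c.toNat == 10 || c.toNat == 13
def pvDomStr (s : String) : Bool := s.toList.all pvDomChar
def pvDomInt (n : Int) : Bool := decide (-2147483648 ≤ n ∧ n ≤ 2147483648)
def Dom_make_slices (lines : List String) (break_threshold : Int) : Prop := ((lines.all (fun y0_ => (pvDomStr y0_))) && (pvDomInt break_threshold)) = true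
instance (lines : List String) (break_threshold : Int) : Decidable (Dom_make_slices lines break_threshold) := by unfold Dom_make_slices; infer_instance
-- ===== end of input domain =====

-- B replaces A's three pieces of running state by an annotate-then-cut pipeline
-- (mark each non-empty line, collect cut indices, slice between consecutive cuts);
-- objective: alternative decomposition, same cost.

-- ===== PORT A =====
-- state: (slices, current_slice, breaks)
def make_slices (lines : List String) (break_threshold : Int) : List (List String) :=
  (lines.foldl
    (fun (st : List (List String) × List String × List String) line =>
      if line != "" then
        if (st.2.2.length : Int) ≥ break_threshold then
          (st.1 ++ [st.2.1], ([line], []))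
        else
          (st.1, (st.2.1 ++ [line], []))
      else
        (st.1, (st.2.1, st.2.2 ++ [line])))
    ([], ([], []))).1

-- ===== PORT B =====
-- pass 1: fold to (gap, marked); pass 2: cut indices, then the slices between consecutive cuts
def make_slices_alt (lines : List String) (break_threshold : Int) : List (List String) :=
  let marked := (lines.foldl
    (fun (st : Int × List (Bool × String)) line =>
      if line == "" then (st.1 + 1, st.2)
      else (0, st.2 ++ [(decide (st.1 ≥ break_threshold), line)])) (0, [])).2
  let cuts := (PySem.List.enumerate marked).filterMap
    (fun p => if p.2.1 then some p.1 else none)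
  ((0 :: cuts).zip cuts).map
    (fun p => (PySem.List.slice marked (some p.1) (some p.2)).map (fun q => q.2))

-- ===== PRECONDITION & SPEC =====
def Spec_make_slices (lines : List String) (break_threshold : Int) (out : List (List String)) : Prop := out = make_slices_alt lines break_threshold
instance (lines : List String) (break_threshold : Int) (out : List (List String)) : Decidable (Spec_make_slices lines break_threshold out) := by unfold Spec_make_slices; infer_instance

-- ===== CLAIM (what is proved, stated in full; the proofs are below) =====
def Claim_equal_make_slices : Prop := ∀ (lines : List String) (break_threshold : Int), Dom_make_slices lines break_threshold → Spec_make_slices lines break_threshold (make_slices lines break_threshold)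

-- ===== LEMMAS AND PROOFS =====

-- A's loop as a recursion (its breaks list kept only as its length)
def goA (bt : Int) : List String → List String → Nat → List (List String)
  | [], _, _ => []
  | l :: ls, cur, g =>
    if l != "" then
      if (g : Int) ≥ bt then cur :: goA bt ls [l] 0
      else goA bt ls (cur ++ [l]) 0
    else goA bt ls cur (g + 1)

-- B's pass 1 as a recursion
def mkB (bt : Int) : List String → Int → List (Bool × String)
  | [], _ => []
  | l :: ls, g =>
    if l == "" then mkB bt ls (g + 1)
    else (decide (g ≥ bt), l) :: mkB bt ls 0

-- the marked list consumed cut-by-cut, with the pending segment cur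
def asmB : List (Bool × String) → List String → List (List String)
  | [], _ => []
  | (f, l) :: m, cur =>
    if f then cur :: asmB m [l] else asmB m (cur ++ [l])

-- cut positions (Nat indices)
def cutsN : List (Bool × String) → List Nat
  | [] => []
  | (f, _) :: m => if f then 0 :: (cutsN m).map (· + 1) else (cutsN m).map (· + 1)

-- the lines of m between a pair of Nat indices
def segN (m : List (Bool × String)) (p : Nat × Nat) : List String :=
  ((m.drop p.1).take (p.2 - p.1)).map (fun q => q.2)

-- asmB described by cut positions
def asmW (m : List (Bool × String)) (cur : List String) : List (List String) :=
  match cutsN m with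
  | [] => []
  | c :: cs => (cur ++ segN m (0, c)) :: ((c :: cs).zip cs).map (segN m)

theorem foldA_spec (bt : Int) (ls : List String) (slices : List (List String))
    (cur brks : List String) :
    (ls.foldl
      (fun (st : List (List String) × List String × List String) line =>
        if line != "" then
          if (st.2.2.length : Int) ≥ bt then
            (st.1 ++ [st.2.1], ([line], []))
          else
            (st.1, (st.2.1 ++ [line], []))
        else
          (st.1, (st.2.1, st.2.2 ++ [line])))
      (slices, (cur, brks))).1 = slices ++ goA bt ls cur brks.length := by
  induction ls generalizing slices cur brks with
  | nil => simp [goA]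
  | cons l ls ih =>
    rw [List.foldl_cons]
    by_cases h : l = ""
    · subst h
      rw [if_neg (by simp)]
      rw [ih]
      simp [goA]
    · rw [if_pos (by simpa using h)]
      by_cases hg : (brks.length : Int) ≥ bt
      · rw [if_pos hg, ih]
        simp [goA, h, hg]
      · rw [if_neg hg, ih]
        simp [goA, h, hg]

theorem foldB_spec (bt : Int) (ls : List String) (g : Int) (acc : List (Bool × String)) :
    (ls.foldl
      (fun (st : Int × List (Bool × String)) line =>
        if line == "" then (st.1 + 1, st.2)
        else (0, st.2 ++ [(decide (st.1 ≥ bt), line)])) (g, acc)).2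
      = acc ++ mkB bt ls g := by
  induction ls generalizing g acc with
  | nil => simp [mkB]
  | cons l ls ih =>
    rw [List.foldl_cons]
    by_cases h : l = ""
    · subst h
      rw [if_pos (by simp), ih]
      simp [mkB]
    · rw [if_neg (by simpa using h), ih]
      simp [mkB, h]

theorem goA_eq_asm (bt : Int) (ls : List String) (cur : List String) (g : Nat) :
    goA bt ls cur g = asmB (mkB bt ls (g : Int)) cur := by
  induction ls generalizing cur g with
  | nil => simp [goA, mkB, asmB]
  | cons l ls ih =>
    by_cases h : l = ""
    · subst h
      have h1 : ((g : Int) + 1) = ((g + 1 : Nat) : Int) := by push_cast; ring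
      simp only [goA, mkB, if_neg (by simp : ¬(("" != "") = true)),
        if_pos (by simp : (("" == "") = true)), h1]
      exact ih _ _
    · by_cases hg : (g : Int) ≥ bt
      · simp only [goA, mkB, if_pos (by simpa using h : ((l != "") = true)),
          if_neg (by simpa using h : ¬((l == "") = true)), if_pos hg, decide_eq_true hg, asmB]
        rw [ih]; norm_cast
      · simp only [goA, mkB, if_pos (by simpa using h : ((l != "") = true)),
          if_neg (by simpa using h : ¬((l == "") = true)), if_neg hg, decide_eq_false hg, asmB]
        rw [if_neg (by simp)]
        rw [ih]; norm_cast

theorem cuts_enum (m : List (Bool × String)) (s : Int) :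
    (PySem.List.enumerate m s).filterMap (fun p => if p.2.1 then some p.1 else none)
      = (cutsN m).map (fun k : Nat => s + (k : Int)) := by
  induction m generalizing s with
  | nil => simp [cutsN, PySem.List.enumerate_nil]
  | cons x m ih =>
    obtain ⟨f, l⟩ := x
    cases f
    · simp only [PySem.List.enumerate_cons, List.filterMap_cons, cutsN, Bool.false_eq_true,
        if_false, ih, List.map_map]
      apply List.map_congr_left; intro k _
      simp only [Function.comp_apply]; push_cast; ring
    · simp only [PySem.List.enumerate_cons, List.filterMap_cons, cutsN, if_true, ih,
        List.map_map, List.map_cons]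
      congr 1
      · simp
      · apply List.map_congr_left; intro k _
        simp only [Function.comp_apply]; push_cast; ring

theorem segN_cons (x : Bool × String) (m : List (Bool × String)) (a b : Nat) :
    segN (x :: m) (a + 1, b + 1) = segN m (a, b) := by
  simp [segN, Nat.succ_sub_succ]

theorem zip_succ (c : Nat) (cs : List Nat) :
    (((c + 1) :: cs.map (· + 1)).zip (cs.map (· + 1)))
      = ((c :: cs).zip cs).map (fun p => (p.1 + 1, p.2 + 1)) := by
  induction cs generalizing c with
  | nil => rfl
  | cons d ds ih => simp only [List.map_cons, List.zip_cons_cons, ih]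

theorem map_segN_zip_succ (x : Bool × String) (m : List (Bool × String)) (c : Nat) (cs : List Nat) :
    ((((c + 1) :: cs.map (· + 1)).zip (cs.map (· + 1))).map (segN (x :: m)))
      = ((c :: cs).zip cs).map (segN m) := by
  rw [zip_succ, List.map_map]
  apply List.map_congr_left; intro p _
  simpa using segN_cons x m p.1 p.2

theorem asm_eq_asmW (m : List (Bool × String)) (cur : List String) :
    asmB m cur = asmW m cur := by
  induction m generalizing cur with
  | nil => simp [asmB, asmW, cutsN]
  | cons x m ih =>
    obtain ⟨f, l⟩ := x
    cases f
    · show asmB m (cur ++ [l]) = asmW ((false, l) :: m) cur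
      rw [ih]
      cases hc : cutsN m with
      | nil =>
        unfold asmW
        rw [show cutsN ((false, l) :: m) = [] by simp [cutsN, hc]]
        rw [hc]
      | cons c cs =>
        have h1 : cutsN ((false, l) :: m) = (c + 1) :: cs.map (· + 1) := by
          simp [cutsN, hc]
        unfold asmW
        rw [h1, hc]
        dsimp only
        rw [map_segN_zip_succ]
        congr 1
        simp [segN, List.append_assoc]
    · show cur :: asmB m [l] = asmW ((true, l) :: m) cur
      rw [ih]
      have h1 : cutsN ((true, l) :: m) = 0 :: (cutsN m).map (· + 1) := by
        simp [cutsN]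
      cases hc : cutsN m with
      | nil =>
        unfold asmW
        rw [h1, hc]
        dsimp only
        simp [segN]
      | cons c cs =>
        unfold asmW
        rw [h1, hc]
        dsimp only [List.map_cons]
        simp only [List.zip_cons_cons, List.map_cons]
        rw [map_segN_zip_succ]
        simp [segN]

theorem zip_cast (c : Nat) (cs : List Nat) :
    (((c : Int) :: cs.map (fun k : Nat => (k : Int))).zip (cs.map (fun k : Nat => (k : Int))))
      = ((c :: cs).zip cs).map (fun p => ((p.1 : Int), (p.2 : Int))) := by
  induction cs generalizing c with
  | nil => rfl
  | cons d ds ih => simp only [List.map_cons, List.zip_cons_cons, ih]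

theorem altB_eq_asmW (m : List (Bool × String)) :
    (((0 : Int) :: ((PySem.List.enumerate m 0).filterMap
        (fun p => if p.2.1 then some p.1 else none))).zip
      ((PySem.List.enumerate m 0).filterMap (fun p => if p.2.1 then some p.1 else none))).map
      (fun p => (PySem.List.slice m (some p.1) (some p.2)).map (fun q => q.2))
      = asmW m [] := by
  rw [cuts_enum]
  simp only [zero_add]
  unfold asmW
  cases hc : cutsN m with
  | nil => simp
  | cons c cs =>
    simp only [List.map_cons, List.zip_cons_cons, zip_cast, List.map_map]
    congr 1
    · rw [show (0 : Int) = ((0 : Nat) : Int) by norm_cast, PySem.List.slice_natCast]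
      simp [segN]
    · apply List.map_congr_left; intro p _
      simp only [Function.comp_apply, PySem.List.slice_natCast]
      rfl

-- ===== VERDICT (by name: the statement is the Claim_ definition above) =====
theorem make_slices_spec : Claim_equal_make_slices := by
  intro lines bt _
  show make_slices lines bt = make_slices_alt lines bt
  unfold make_slices make_slices_alt
  rw [foldA_spec, foldB_spec]
  simp only [List.nil_append, List.length_nil]
  rw [goA_eq_asm bt lines [] 0, Nat.cast_zero, asm_eq_asmW]
  exact (altB_eq_asmW (mkB bt lines 0)).symm
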